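-- pv_equiv track=rewrite | github.com/ARUNKUMARGV12/A-Visual-Centric-AI-Platform-for-Interactive-and-Adaptive-Learning | Visual-centric-AI-platform-for-effective-Learning-main/backend/src/agents/enhanced_learning_agent.py | _explain_algorithm
-- ===== SOURCE A (Python) =====
-- def _explain_algorithm(code: str, language: str) -> str:
--     """Generate algorithm explanation based on code structure"""
--     lines = code.split('\n')
--     non_empty_lines = [line.strip() for line in lines if line.strip()]
--
--     explanation = "This code performs the following operations:\n"
--
--     # Analyze code patterns
--     if any('for' in line or 'while' in line for line in non_empty_lines):
--         explanation += "• Uses loops for iterative processing\n"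
--
--     if any('if' in line for line in non_empty_lines):
--         explanation += "• Contains conditional logic for decision making\n"
--
--     if any('function' in line for line in non_empty_lines):
--         explanation += "• Defines reusable functions for modular code organization\n"
--
--     if any('return' in line for line in non_empty_lines):
--         explanation += "• Returns values for further processing or display\n"
--
--     return explanation
-- ===== SOURCE B (Python) =====
-- def _explain_algorithm(code: str, language: str) -> str:
--     """Single pass over the lines, accumulating four flags, then building the text."""
--     has_loop = has_cond = has_func = has_ret = False
--     for raw in code.split('\n'):
--         line = raw.strip()
--         if not line:
--             continue
--         has_loop = has_loop or 'for' in line or 'while' in line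
--         has_cond = has_cond or 'if' in line
--         has_func = has_func or 'function' in line
--         has_ret = has_ret or 'return' in line
--     parts = ["This code performs the following operations:\n"]
--     if has_loop:
--         parts.append("• Uses loops for iterative processing\n")
--     if has_cond:
--         parts.append("• Contains conditional logic for decision making\n")
--     if has_func:
--         parts.append("• Defines reusable functions for modular code organization\n")
--     if has_ret:
--         parts.append("• Returns values for further processing or display\n")
--     return "".join(parts)
-- ===== Notes on version B (the rewrite author's own statement) =====
-- stated objective: alternative
-- what changed: B replaces the four separate any() scans over a precomputed non-empty-lines list with one pass over the split lines that strips each line once and accumulates four boolean flags, then assembles the text from the flags.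
import Mathlib
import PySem

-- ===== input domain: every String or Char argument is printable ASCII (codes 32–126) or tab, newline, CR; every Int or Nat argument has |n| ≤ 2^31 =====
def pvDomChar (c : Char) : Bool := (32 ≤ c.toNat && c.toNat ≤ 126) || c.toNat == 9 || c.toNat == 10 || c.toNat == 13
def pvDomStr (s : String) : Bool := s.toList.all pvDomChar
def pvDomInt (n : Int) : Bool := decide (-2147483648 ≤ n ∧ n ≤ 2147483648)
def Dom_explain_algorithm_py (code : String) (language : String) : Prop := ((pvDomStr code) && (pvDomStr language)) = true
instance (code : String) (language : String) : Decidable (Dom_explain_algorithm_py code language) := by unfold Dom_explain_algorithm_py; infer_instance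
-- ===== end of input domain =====

-- B does one flag-accumulating pass over the lines instead of four any() scans (objective: alternative decomposition).
-- ===== PORT A =====
def explain_algorithm_py (code : String) (language : String) : String :=
  let lines := (PySem.Str.split? code "\n").getD []   -- split? is some: the separator "\n" is non-empty
  let non_empty_lines := (lines.filter (fun line => PySem.Str.strip line ≠ "")).map (fun line => PySem.Str.strip line)
  let explanation := "This code performs the following operations:\n"
  let explanation := if non_empty_lines.any (fun line => PySem.Str.isIn "for" line || PySem.Str.isIn "while" line) then explanation ++ "\u2022 Uses loops for iterative processing\n" else explanation
  let explanation := if non_empty_lines.any (fun line => PySem.Str.isIn "if" line) then explanation ++ "\u2022 Contains conditional logic for decision making\n" else explanation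
  let explanation := if non_empty_lines.any (fun line => PySem.Str.isIn "function" line) then explanation ++ "\u2022 Defines reusable functions for modular code organization\n" else explanation
  let explanation := if non_empty_lines.any (fun line => PySem.Str.isIn "return" line) then explanation ++ "\u2022 Returns values for further processing or display\n" else explanation
  explanation

-- ===== PORT B =====
-- one pass over the raw lines, stripping each once and OR-ing four flags
def pvScan : List String → Bool × Bool × Bool × Bool → Bool × Bool × Bool × Bool
  | [], fl => fl
  | raw :: rest, (lp, cond, fn, ret) =>
    let line := PySem.Str.strip raw
    if line = "" then pvScan rest (lp, cond, fn, ret)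
    else pvScan rest
      (lp || PySem.Str.isIn "for" line || PySem.Str.isIn "while" line,
       cond || PySem.Str.isIn "if" line,
       fn || PySem.Str.isIn "function" line,
       ret || PySem.Str.isIn "return" line)

def explain_algorithm_py_alt (code : String) (language : String) : String :=
  let fl := pvScan ((PySem.Str.split? code "\n").getD []) (false, false, false, false)
  let parts : List String := ["This code performs the following operations:\n"]
    ++ (if fl.1 then ["\u2022 Uses loops for iterative processing\n"] else [])
    ++ (if fl.2.1 then ["\u2022 Contains conditional logic for decision making\n"] else [])
    ++ (if fl.2.2.1 then ["\u2022 Defines reusable functions for modular code organization\n"] else [])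
    ++ (if fl.2.2.2 then ["\u2022 Returns values for further processing or display\n"] else [])
  PySem.Str.join "" parts

-- ===== PRECONDITION & SPEC =====
def Spec_explain_algorithm_py (code : String) (language : String) (out : String) : Prop := out = explain_algorithm_py_alt code language
instance (code : String) (language : String) (out : String) : Decidable (Spec_explain_algorithm_py code language out) := by unfold Spec_explain_algorithm_py; infer_instance

-- ===== CLAIM =====
def Claim_equal_explain_algorithm_py : Prop := ∀ (code : String) (language : String), Dom_explain_algorithm_py code language → Spec_explain_algorithm_py code language (explain_algorithm_py code language)

-- ===== LEMMAS AND PROOFS =====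
-- the single-pass scan computes exactly the four any() results over the stripped non-empty lines
theorem pvScan_eq (ls : List String) (a b c d : Bool) :
    pvScan ls (a, b, c, d) =
      (a || ((ls.filter (fun line => PySem.Str.strip line ≠ "")).map (fun line => PySem.Str.strip line)).any (fun line => PySem.Str.isIn "for" line || PySem.Str.isIn "while" line),
       b || ((ls.filter (fun line => PySem.Str.strip line ≠ "")).map (fun line => PySem.Str.strip line)).any (fun line => PySem.Str.isIn "if" line),
       c || ((ls.filter (fun line => PySem.Str.strip line ≠ "")).map (fun line => PySem.Str.strip line)).any (fun line => PySem.Str.isIn "function" line),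
       d || ((ls.filter (fun line => PySem.Str.strip line ≠ "")).map (fun line => PySem.Str.strip line)).any (fun line => PySem.Str.isIn "return" line)) := by
  induction ls generalizing a b c d with
  | nil => simp [pvScan]
  | cons raw rest ih =>
    simp only [pvScan]
    by_cases h : PySem.Str.strip raw = ""
    · simp [h, ih]
    · simp [h, ih, Bool.or_assoc]

-- for fixed flag values both builders produce the same literal string
theorem build_eq (b1 b2 b3 b4 : Bool) :
    (let e := "This code performs the following operations:\n"
     let e := if b1 then e ++ "\u2022 Uses loops for iterative processing\n" else e
     let e := if b2 then e ++ "\u2022 Contains conditional logic for decision making\n" else e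
     let e := if b3 then e ++ "\u2022 Defines reusable functions for modular code organization\n" else e
     if b4 then e ++ "\u2022 Returns values for further processing or display\n" else e) =
    PySem.Str.join "" (["This code performs the following operations:\n"]
      ++ (if b1 then ["\u2022 Uses loops for iterative processing\n"] else [])
      ++ (if b2 then ["\u2022 Contains conditional logic for decision making\n"] else [])
      ++ (if b3 then ["\u2022 Defines reusable functions for modular code organization\n"] else [])
      ++ (if b4 then ["\u2022 Returns values for further processing or display\n"] else [])) := by
  cases b1 <;> cases b2 <;> cases b3 <;> cases b4 <;> decide

-- ===== VERDICT =====
theorem explain_algorithm_py_spec : Claim_equal_explain_algorithm_py := by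
  intro code language _
  unfold Spec_explain_algorithm_py explain_algorithm_py explain_algorithm_py_alt
  rw [pvScan_eq]
  simp only [Bool.false_or]
  exact build_eq _ _ _ _
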